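-- pv_equiv track=rewrite | github.com/ayush23f/Coding-problems | CamelCase.py | camel_case_check
-- ===== SOURCE A (Python) =====
-- def camel_case_check(words,variableName):
--     #convert it to lower case
--     variableName = variableName[0].lower() + variableName[1:]
--
--     #create a list
--     array = []
--
--     current_word = '' #empty string
--
--     for i in variableName:
--         if i.isupper(): #If a capital letter is found
--             if current_word:
--                 array.append(current_word)#he current word is completed and added to split_words.
--             current_word = i.lower()#A new word begins, starting with the lowercase version of the capital letter.
--
--         else:
--             current_word+=i
--
--     if current_word:
--         array.append(current_word)
--
--
--     return all(word in words for word in array)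
-- ===== SOURCE B (Python) =====
-- def camel_case_check(words, variableName):
--     s = variableName[0].lower() + variableName[1:]
--     marked = ''.join('\0' + c.lower() if c.isupper() else c for c in s)
--     array = [w for w in marked.split('\0') if w]
--     return all(word in words for word in array)
-- ===== Notes on version B (the rewrite author's own statement) =====
-- stated objective: simpler
-- what changed: Replaces the stateful character loop (current-word accumulator with flush-on-capital and end-of-string flush) by marker insertion: lowercase each capital with a NUL marker prepended, split on the marker, drop empty pieces.
import Mathlib
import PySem

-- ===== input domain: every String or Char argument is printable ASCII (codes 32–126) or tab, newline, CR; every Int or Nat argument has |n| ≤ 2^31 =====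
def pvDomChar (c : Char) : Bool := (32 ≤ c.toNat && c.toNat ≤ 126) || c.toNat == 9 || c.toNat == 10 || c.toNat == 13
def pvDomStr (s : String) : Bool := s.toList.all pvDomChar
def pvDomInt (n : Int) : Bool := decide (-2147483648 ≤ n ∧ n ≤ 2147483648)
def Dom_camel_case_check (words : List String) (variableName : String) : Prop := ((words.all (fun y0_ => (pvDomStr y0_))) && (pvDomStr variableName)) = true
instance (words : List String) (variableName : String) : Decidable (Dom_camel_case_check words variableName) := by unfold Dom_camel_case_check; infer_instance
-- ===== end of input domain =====

-- B replaces A's stateful current-word accumulator by marker insertion ('\x00' before each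
-- capital, lowercased) followed by a split on the marker; objective: simpler decomposition.

-- ===== PORT A =====
-- A's loop state: (array, current_word); branches in A's order.
def camelStepA (st : List (List Char) × List Char) (i : Char) : List (List Char) × List Char :=
  if PySem.Chars.isupper i then
    (if st.2 ≠ [] then st.1 ++ [st.2] else st.1, [PySem.Chars.lowerChar i])
  else
    (st.1, st.2 ++ [i])

def camel_case_check (words : List String) (variableName : String) : Bool :=
  match variableName.toList with
  | [] => false   -- variableName[0] raises IndexError in Python: excluded by Pre_
  | c :: rest =>
    let s := PySem.Chars.lowerChar c :: rest
    let st := s.foldl camelStepA ([], [])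
    let array := if st.2 ≠ [] then st.1 ++ [st.2] else st.1
    array.all (fun w => words.contains (String.ofList w))

-- ===== PORT B =====
-- the generator "'\0' + c.lower() if c.isupper() else c" of B, per character
def camelMarkB (i : Char) : List Char :=
  if PySem.Chars.isupper i then ['\x00', PySem.Chars.lowerChar i] else [i]

def camel_case_check_alt (words : List String) (variableName : String) : Bool :=
  match variableName.toList with
  | [] => false   -- variableName[0] raises IndexError in Python: excluded by Pre_
  | c :: rest =>
    let s := PySem.Chars.lowerChar c :: rest
    let marked := s.flatMap camelMarkB
    let array := (List.splitOn '\x00' marked).filter (fun w => w ≠ [])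
    array.all (fun w => words.contains (String.ofList w))

-- ===== PRECONDITION & SPEC =====
-- Pre_ excludes only the empty variableName, on which A's variableName[0] raises IndexError.
def Pre_camel_case_check (_words : List String) (variableName : String) : Prop := variableName ≠ ""
instance (words : List String) (variableName : String) : Decidable (Pre_camel_case_check words variableName) := by unfold Pre_camel_case_check; infer_instance
def pvWitness_camel_case_check : List String × String := (["hello", "world"], "helloWorld")

def Spec_camel_case_check (words : List String) (variableName : String) (out : Bool) : Prop := out = camel_case_check_alt words variableName
instance (words : List String) (variableName : String) (out : Bool) : Decidable (Spec_camel_case_check words variableName out) := by unfold Spec_camel_case_check; infer_instance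

-- ===== CLAIM (what is proved, stated in full; the proofs are below) =====
def Claim_equal_camel_case_check : Prop := ∀ (words : List String) (variableName : String), Dom_camel_case_check words variableName → Pre_camel_case_check words variableName → Spec_camel_case_check words variableName (camel_case_check words variableName)

-- ===== LEMMAS AND PROOFS =====

theorem lowerChar_ne_nul {c : Char} (h : c ≠ '\x00') : PySem.Chars.lowerChar c ≠ '\x00' := by
  unfold PySem.Chars.lowerChar
  split_ifs with hu
  · have h1 : ('A' : Char) ≤ c := of_decide_eq_true ((Bool.and_eq_true _ _).mp hu).1
    have h2 : c ≤ ('Z' : Char) := of_decide_eq_true ((Bool.and_eq_true _ _).mp hu).2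
    have hge : 65 ≤ c.toNat := h1
    have hle : c.toNat ≤ 90 := h2
    intro hcon
    have hv : (c.toNat + 32).isValidChar := by unfold Nat.isValidChar; omega
    have heq : (Char.ofNat (c.toNat + 32)).toNat = c.toNat + 32 := by simp [Char.ofNat, hv]
    rw [hcon] at heq
    have h0 : ('\x00' : Char).toNat = 0 := rfl
    omega
  · exact h

theorem dom_char_ne_nul {c : Char} (h : pvDomChar c = true) : c ≠ '\x00' := by
  intro hc; subst hc; simp [pvDomChar] at h

-- main invariant: A's loop (with final flush) over cs, started at (array, cur),
-- equals array ++ the nonempty pieces of splitting (cur ++ marked cs) on the marker.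
theorem camel_loop_eq_split (cs : List Char) (array : List (List Char)) (cur : List Char)
    (hcur : '\x00' ∉ cur)
    (hcs : ∀ c ∈ cs, c ≠ '\x00') :
    (let st := cs.foldl camelStepA (array, cur)
     if st.2 ≠ [] then st.1 ++ [st.2] else st.1)
    = array ++ (List.splitOn '\x00' (cur ++ cs.flatMap camelMarkB)).filter (fun w => w ≠ []) := by
  induction cs generalizing array cur with
  | nil =>
    simp only [List.foldl_nil, List.flatMap_nil, List.append_nil]
    rw [List.splitOn, List.splitOnP_eq_single]
    · by_cases h : cur = [] <;> simp [h]
    · intro x hx; simp only [beq_iff_eq]; intro hx0; exact hcur (hx0 ▸ hx)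
  | cons i cs ih =>
    have hi : i ≠ '\x00' := hcs i (by simp)
    have hcs' : ∀ c ∈ cs, c ≠ '\x00' := fun c hc => hcs c (by simp [hc])
    simp only [List.foldl_cons, List.flatMap_cons, camelStepA, camelMarkB]
    by_cases hu : PySem.Chars.isupper i
    · simp only [hu, if_true]
      rw [ih _ _ (by simpa using (lowerChar_ne_nul hi).symm) hcs']
      have hsplit : List.splitOn '\x00' (cur ++ ('\x00' :: PySem.Chars.lowerChar i :: cs.flatMap camelMarkB))
          = cur :: List.splitOn '\x00' (PySem.Chars.lowerChar i :: cs.flatMap camelMarkB) := by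
        rw [List.splitOn, List.splitOn, List.splitOnP_first]
        · intro x hx; simp only [beq_iff_eq]; intro hx0; exact hcur (hx0 ▸ hx)
        · simp
      simp only [List.cons_append, List.nil_append]
      rw [hsplit]
      by_cases h : cur = [] <;> simp [h, List.append_assoc]
    · simp only [hu, if_false, Bool.false_eq_true]
      rw [ih _ _ (by
        intro hmem
        rcases List.mem_append.mp hmem with hh | hh
        · exact hcur hh
        · simp only [List.mem_singleton] at hh; exact hi hh.symm) hcs']
      simp [List.append_assoc]

-- ===== VERDICT (by name: the statement is the Claim_ definition above) =====
theorem camel_case_check_spec : Claim_equal_camel_case_check := by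
  intro words variableName hdom hpre
  unfold Spec_camel_case_check camel_case_check camel_case_check_alt
  cases hvn : variableName.toList with
  | nil => rfl
  | cons c rest =>
    have hdomv : pvDomStr variableName = true := by
      unfold Dom_camel_case_check at hdom
      exact (Bool.and_elim_right hdom)
    have hchars : ∀ x ∈ variableName.toList, pvDomChar x = true := by
      simpa [pvDomStr, List.all_eq_true] using hdomv
    have hc : pvDomChar c = true := hchars c (by simp [hvn])
    have hrest : ∀ x ∈ rest, x ≠ '\x00' := by
      intro x hx
      exact dom_char_ne_nul (hchars x (by simp [hvn, hx]))
    have hs : ∀ x ∈ PySem.Chars.lowerChar c :: rest, x ≠ '\x00' := by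
      intro x hx
      rcases List.mem_cons.mp hx with h | h
      · exact h ▸ lowerChar_ne_nul (dom_char_ne_nul hc)
      · exact hrest x h
    simp only
    rw [camel_loop_eq_split (PySem.Chars.lowerChar c :: rest) [] [] (by simp) hs]
    simp
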